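-- pv_equiv track=rewrite | github.com/Arsen1302/Code-copy-detector | TestData/solutions/problem_497_3_1.py | solution_497_3_2
-- ===== SOURCE A (Python) =====
-- def solution_497_3_2(s,x):
--         i = j = 0
--         while i < len(s) and j < len(x):
--             counts = 1
--             while i<len(s)-1 and s[i]==s[i+1]:
--                 i+=1
--                 counts+=1
--             countx = 1
--             while j<len(x)-1 and x[j]==x[j+1]:
--                 j+=1
--                 countx+=1
--             if s[i]!=x[j]:
--                 return 0
--             i+=1
--             j+=1
--             if counts<countx:
--                 return 0
--             if countx==counts: continue
--             if counts<=2: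
--                 return 0
--         return 1 if i>=len(s) and j>=len(x) else 0
-- ===== SOURCE B (Python) =====
-- def solution_497_3_2(s, x):
--     def rle(t):
--         res = []
--         for c in t:
--             if res and res[-1][0] == c:
--                 res[-1] = (c, res[-1][1] + 1)
--             else:
--                 res.append((c, 1))
--         return res
--     a = rle(s)
--     b = rle(x)
--     if len(a) != len(b):
--         return 0
--     for (cs, ns), (cx, nx) in zip(a, b):
--         if cs != cx or ns < nx or (ns > nx and ns <= 2):
--             return 0
--     return 1
-- ===== Notes on version B (the rewrite author's own statement) =====
-- stated objective: simpler
-- what changed: Replaces A's single interleaved index-juggling scan (nested while loops advancing two cursors) by a two-phase design: build run-length encodings of both strings, then compare the aligned (char,count) pairs with one flat rule plus a final length check (fewer per-character index operations).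
import Mathlib
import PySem

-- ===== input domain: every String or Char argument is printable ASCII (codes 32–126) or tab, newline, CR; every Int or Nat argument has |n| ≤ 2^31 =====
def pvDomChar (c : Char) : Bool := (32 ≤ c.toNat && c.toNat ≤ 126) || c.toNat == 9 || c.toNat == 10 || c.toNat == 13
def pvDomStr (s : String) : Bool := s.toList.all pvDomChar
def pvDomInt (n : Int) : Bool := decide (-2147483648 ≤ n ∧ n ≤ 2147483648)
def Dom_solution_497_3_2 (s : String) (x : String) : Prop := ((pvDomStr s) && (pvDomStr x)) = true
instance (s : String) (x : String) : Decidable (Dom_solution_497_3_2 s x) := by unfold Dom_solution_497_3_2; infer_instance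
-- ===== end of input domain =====

-- B replaces A's interleaved two-cursor scan by build-RLE-then-compare: same values, simpler decomposition (no speed claim).


-- ===== PORT A =====
-- inner 'while i<len(s)-1 and s[i]==s[i+1]: i+=1; counts+=1' (indices are in range whenever accessed, so getD is exact)
def pvCountRun (cs : List Char) (i : Nat) (counts : Nat) : Nat × Nat :=
  if i + 1 < cs.length ∧ cs.getD i ' ' = cs.getD (i+1) ' ' then
    pvCountRun cs (i+1) (counts+1)
  else (i, counts)
termination_by cs.length - i
decreasing_by
  have h : i + 1 < cs.length ∧ cs.getD i ' ' = cs.getD (i+1) ' ' := by assumption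
  exact Nat.sub_succ_lt_self _ _ (Nat.lt_of_succ_lt h.1)

theorem pvCountRun_ge (cs : List Char) (i counts : Nat) : i ≤ (pvCountRun cs i counts).1 := by
  fun_induction pvCountRun with
  | case1 i counts h ih => omega
  | case2 => simp

-- outer 'while i < len(s) and j < len(x)' loop of A, with its return points
def pvLoopA (cs cx : List Char) (i j : Nat) : Int :=
  if i < cs.length ∧ j < cx.length then
    let p := pvCountRun cs i 1
    let q := pvCountRun cx j 1
    if cs.getD p.1 ' ' ≠ cx.getD q.1 ' ' then 0
    else if p.2 < q.2 then 0
    else if q.2 = p.2 then pvLoopA cs cx (p.1 + 1) (q.1 + 1)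
    else if p.2 ≤ 2 then 0
    else pvLoopA cs cx (p.1 + 1) (q.1 + 1)
  else if i ≥ cs.length ∧ j ≥ cx.length then 1 else 0
termination_by (cs.length - i) + (cx.length - j)
decreasing_by
  · have h : i < cs.length ∧ j < cx.length := by assumption
    exact Nat.add_lt_add_of_lt_of_le
      (Nat.sub_lt_sub_left h.1 (Nat.lt_succ_of_le (pvCountRun_ge cs i 1)))
      (Nat.sub_le_sub_left (Nat.le_succ_of_le (pvCountRun_ge cx j 1)) cx.length)
  · have h : i < cs.length ∧ j < cx.length := by assumption
    exact Nat.add_lt_add_of_lt_of_le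
      (Nat.sub_lt_sub_left h.1 (Nat.lt_succ_of_le (pvCountRun_ge cs i 1)))
      (Nat.sub_le_sub_left (Nat.le_succ_of_le (pvCountRun_ge cx j 1)) cx.length)

def solution_497_3_2 (s : String) (x : String) : Int :=
  pvLoopA s.toList x.toList 0 0

-- ===== PORT B =====
-- one step of B's rle loop body (append-or-bump-last)
def pvRleStep (res : List (Char × Nat)) (c : Char) : List (Char × Nat) :=
  match res.getLast? with
  | some (d, n) => if d = c then res.dropLast ++ [(c, n + 1)] else res ++ [(c, 1)]
  | none => [(c, 1)]

def pvRle (t : List Char) : List (Char × Nat) := t.foldl pvRleStep []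

-- B's 'for … in zip(a,b)' comparison loop
def pvCmpLoop : List ((Char × Nat) × (Char × Nat)) → Int
  | [] => 1
  | ((cs, ns), (cx, nx)) :: rest =>
      if cs ≠ cx ∨ ns < nx ∨ (ns > nx ∧ ns ≤ 2) then 0 else pvCmpLoop rest

def solution_497_3_2_alt (s : String) (x : String) : Int :=
  let a := pvRle s.toList
  let b := pvRle x.toList
  if a.length ≠ b.length then 0 else pvCmpLoop (a.zip b)

-- ===== PRECONDITION & SPEC =====
def Spec_solution_497_3_2 (s : String) (x : String) (out : Int) : Prop := out = solution_497_3_2_alt s x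
instance (s : String) (x : String) (out : Int) : Decidable (Spec_solution_497_3_2 s x out) := by unfold Spec_solution_497_3_2; infer_instance

-- ===== CLAIM (what is proved, stated in full; the proofs are below) =====
def Claim_equal_solution_497_3_2 : Prop := ∀ (s : String) (x : String), Dom_solution_497_3_2 s x → Spec_solution_497_3_2 s x (solution_497_3_2 s x)

-- ===== LEMMAS AND PROOFS =====

-- front-recursive run-length encoding used only in the proof
def rleCons (c : Char) (n : Nat) : List Char → List (Char × Nat)
  | [] => [(c, n)]
  | d :: t => if d = c then rleCons c (n + 1) t else (c, n) :: rleCons d 1 t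

def rleF : List Char → List (Char × Nat)
  | [] => []
  | c :: t => rleCons c 1 t

-- simultaneous comparison, the common middle ground of both programs
def go2 : List (Char × Nat) → List (Char × Nat) → Int
  | [], [] => 1
  | [], _ :: _ => 0
  | _ :: _, [] => 0
  | (cs, ns) :: as, (cx, nx) :: bs =>
      if cs ≠ cx ∨ ns < nx ∨ (ns > nx ∧ ns ≤ 2) then 0 else go2 as bs

theorem foldl_pvRleStep (t : List Char) (res : List (Char × Nat)) (c : Char) (n : Nat) :
    List.foldl pvRleStep (res ++ [(c, n)]) t = res ++ rleCons c n t := by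
  induction t generalizing res c n with
  | nil => simp [rleCons]
  | cons d t ih =>
    simp only [List.foldl_cons]
    by_cases hdc : c = d
    · subst hdc
      have : pvRleStep (res ++ [(c, n)]) c = res ++ [(c, n + 1)] := by
        simp [pvRleStep]
      rw [this, ih, rleCons]
      simp
    · have hne : ¬ (d = c) := fun h => hdc h.symm
      have hstep : pvRleStep (res ++ [(c, n)]) d = (res ++ [(c, n)]) ++ [(d, 1)] := by
        simp [pvRleStep]
        intro h; exact absurd h hdc
      rw [hstep, ih]
      simp only [rleCons, if_neg hne]
      simp

theorem pvRle_eq_rleF (t : List Char) : pvRle t = rleF t := by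
  cases t with
  | nil => simp [pvRle, rleF]
  | cons c t =>
    have h0 : pvRleStep [] c = [(c, 1)] := by simp [pvRleStep]
    have h1 := foldl_pvRleStep t [] c 1
    simp only [List.nil_append] at h1
    show List.foldl pvRleStep (pvRleStep [] c) t = rleF (c :: t)
    rw [h0]
    simp only [rleF]
    exact h1

theorem pvCountRun_spec (cs : List Char) (i n : Nat) (hi : i < cs.length) :
    rleCons (cs.getD i ' ') n (cs.drop (i + 1)) =
      (cs.getD i ' ', (pvCountRun cs i n).2) :: rleF (cs.drop ((pvCountRun cs i n).1 + 1)) ∧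
    (pvCountRun cs i n).1 < cs.length ∧
    cs.getD (pvCountRun cs i n).1 ' ' = cs.getD i ' ' := by
  revert hi
  fun_induction pvCountRun with
  | case1 i n h ih =>
    intro hi
    obtain ⟨hlt, heq⟩ := h
    have hdrop : cs.drop (i + 1) = cs.getD (i+1) ' ' :: cs.drop (i + 2) := by
      rw [List.getD_eq_getElem _ _ hlt]
      rw [List.drop_eq_getElem_cons hlt]
    obtain ⟨ih1, ih2, ih3⟩ := ih hlt
    refine ⟨?_, ih2, by rw [ih3, ← heq]⟩
    rw [hdrop]
    simp only [rleCons]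
    rw [if_pos heq.symm, heq]
    simpa using ih1
  | case2 i n h =>
    intro hi
    refine ⟨?_, hi, rfl⟩
    by_cases hlen : i + 1 < cs.length
    · have hne : cs.getD i ' ' ≠ cs.getD (i+1) ' ' := fun he => h ⟨hlen, he⟩
      have hdrop : cs.drop (i + 1) = cs.getD (i+1) ' ' :: cs.drop (i + 2) := by
        rw [List.getD_eq_getElem _ _ hlen]
        rw [List.drop_eq_getElem_cons hlen]
      have hne2 : ¬ (cs.getD (i+1) ' ' = cs.getD i ' ') := fun he => hne he.symm
      rw [hdrop]
      simp only [rleCons, rleF]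
      rw [if_neg hne2]
    · have hdrop : cs.drop (i + 1) = [] := by
        apply List.drop_eq_nil_of_le; omega
      rw [hdrop]
      simp only [rleCons, rleF]

theorem rleF_drop_run (cs : List Char) (i : Nat) (hi : i < cs.length) :
    rleF (cs.drop i) = (cs.getD i ' ', (pvCountRun cs i 1).2) ::
      rleF (cs.drop ((pvCountRun cs i 1).1 + 1)) := by
  have hds : cs.drop i = cs.getD i ' ' :: cs.drop (i + 1) := by
    rw [List.getD_eq_getElem _ _ hi]; exact List.drop_eq_getElem_cons hi
  rw [hds]
  simp only [rleF]
  exact (pvCountRun_spec cs i 1 hi).1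

theorem pvLoopA_eq_go2 (cs cx : List Char) (i j : Nat) :
    pvLoopA cs cx i j = go2 (rleF (cs.drop i)) (rleF (cx.drop j)) := by
  fun_induction pvLoopA with
  | case1 i j hij p q hc =>
    obtain ⟨hi, hj⟩ := hij
    rw [rleF_drop_run cs i hi, rleF_drop_run cx j hj, go2]
    have hcc : cs.getD i ' ' ≠ cx.getD j ' ' := by
      rw [← (pvCountRun_spec cs i 1 hi).2.2, ← (pvCountRun_spec cx j 1 hj).2.2]
      exact hc
    rw [if_pos (Or.inl hcc)]
  | case2 i j hij p q hc h1 =>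
    obtain ⟨hi, hj⟩ := hij
    rw [rleF_drop_run cs i hi, rleF_drop_run cx j hj, go2]
    rw [if_pos (Or.inr (Or.inl h1))]
  | case3 i j hij p q hc h1 h2 ih =>
    obtain ⟨hi, hj⟩ := hij
    have h1' : ¬ (pvCountRun cs i 1).2 < (pvCountRun cx j 1).2 := h1
    have h2' : (pvCountRun cx j 1).2 = (pvCountRun cs i 1).2 := h2
    rw [rleF_drop_run cs i hi, rleF_drop_run cx j hj, go2]
    have hcc : cs.getD i ' ' = cx.getD j ' ' := by
      rw [← (pvCountRun_spec cs i 1 hi).2.2, ← (pvCountRun_spec cx j 1 hj).2.2]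
      exact not_not.mp hc
    have hcond : ¬ (cs.getD i ' ' ≠ cx.getD j ' ' ∨ (pvCountRun cs i 1).2 < (pvCountRun cx j 1).2 ∨
        ((pvCountRun cs i 1).2 > (pvCountRun cx j 1).2 ∧ (pvCountRun cs i 1).2 ≤ 2)) := by
      rintro (hne | hlt | ⟨hgt, _⟩)
      · exact hne hcc
      · exact h1' hlt
      · omega
    rw [if_neg hcond]
    exact ih
  | case4 i j hij p q hc h1 h2 h3 =>
    obtain ⟨hi, hj⟩ := hij
    have h1' : ¬ (pvCountRun cs i 1).2 < (pvCountRun cx j 1).2 := h1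
    have h2' : ¬ (pvCountRun cx j 1).2 = (pvCountRun cs i 1).2 := h2
    have h3' : (pvCountRun cs i 1).2 ≤ 2 := h3
    rw [rleF_drop_run cs i hi, rleF_drop_run cx j hj, go2]
    rw [if_pos (Or.inr (Or.inr ⟨by omega, h3'⟩))]
  | case5 i j hij p q hc h1 h2 h3 ih =>
    obtain ⟨hi, hj⟩ := hij
    have h1' : ¬ (pvCountRun cs i 1).2 < (pvCountRun cx j 1).2 := h1
    have h3' : ¬ (pvCountRun cs i 1).2 ≤ 2 := h3
    rw [rleF_drop_run cs i hi, rleF_drop_run cx j hj, go2]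
    have hcc : cs.getD i ' ' = cx.getD j ' ' := by
      rw [← (pvCountRun_spec cs i 1 hi).2.2, ← (pvCountRun_spec cx j 1 hj).2.2]
      exact not_not.mp hc
    have hcond : ¬ (cs.getD i ' ' ≠ cx.getD j ' ' ∨ (pvCountRun cs i 1).2 < (pvCountRun cx j 1).2 ∨
        ((pvCountRun cs i 1).2 > (pvCountRun cx j 1).2 ∧ (pvCountRun cs i 1).2 ≤ 2)) := by
      rintro (hne | hlt | ⟨_, hle⟩)
      · exact hne hcc
      · exact h1' hlt
      · exact h3' hle
    rw [if_neg hcond]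
    exact ih
  | case6 i j h1 h2 =>
    obtain ⟨hi, hj⟩ := h2
    rw [List.drop_eq_nil_of_le hi, List.drop_eq_nil_of_le hj]
    rw [show rleF [] = [] from rfl, go2]
  | case7 i j h1 h2 =>
    rw [not_and_or, not_lt, not_lt] at h1
    rw [not_and_or, not_le, not_le] at h2
    by_cases hi : i ≥ cs.length
    · have hj : j < cx.length := by omega
      rw [List.drop_eq_nil_of_le hi, rleF_drop_run cx j hj]
      rw [show rleF [] = [] from rfl, go2]
    · have hi' : i < cs.length := by omega
      have hj : cx.length ≤ j := by omega
      rw [List.drop_eq_nil_of_le hj, rleF_drop_run cs i hi']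
      rw [show rleF ([] : List Char) = [] from rfl, go2]

theorem go2_ne_len (a b : List (Char × Nat)) (h : a.length ≠ b.length) : go2 a b = 0 := by
  induction a generalizing b with
  | nil => cases b with
    | nil => simp at h
    | cons q bs => rw [go2]
  | cons p as ih =>
    cases b with
    | nil => cases p; rw [go2]
    | cons q bs =>
      cases p; cases q
      rw [go2]
      split
      · rfl
      · exact ih bs (by simpa using h)

theorem cmp_eq_go2 (a b : List (Char × Nat)) :
    (if a.length ≠ b.length then 0 else pvCmpLoop (a.zip b)) = go2 a b := by
  induction a generalizing b with
  | nil =>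
    cases b with
    | nil => simp [pvCmpLoop, go2]
    | cons q bs => simp [go2]
  | cons p as ih =>
    cases b with
    | nil => cases p; simp [go2]
    | cons q bs =>
      cases p with | mk cs ns =>
      cases q with | mk cx nx =>
      by_cases hlen : (as.length : Nat) = bs.length
      · have h1 : ¬ ((cs, ns) :: as).length ≠ ((cx, nx) :: bs).length := by simp [hlen]
        rw [if_neg h1]
        rw [List.zip_cons_cons, pvCmpLoop, go2]
        split
        · rfl
        · rw [← ih bs, if_neg (by simp [hlen])]
      · have h1 : ((cs, ns) :: as).length ≠ ((cx, nx) :: bs).length := by simp [hlen]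
        rw [if_pos h1, go2]
        split
        · rfl
        · exact (go2_ne_len as bs hlen).symm

-- ===== VERDICT (by name: the statement is the Claim_ definition above) =====
theorem solution_497_3_2_spec : Claim_equal_solution_497_3_2 := by
  intro s x _
  unfold Spec_solution_497_3_2 solution_497_3_2 solution_497_3_2_alt
  rw [pvLoopA_eq_go2]
  simp only [List.drop_zero]
  rw [pvRle_eq_rleF, pvRle_eq_rleF]
  exact (cmp_eq_go2 _ _).symm
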